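-- pv_equiv track=rewrite | github.com/Pichayanon/detect-green-circle | extract_graph_from_image.py | is_single_year_range
-- ===== SOURCE A (Python) =====
-- def is_single_year_range(mapping):
--     tick_pair_count = {}
--     for m in mapping:
--         key = m['between_tick']
--         tick_pair_count.setdefault(key, 0)
--         tick_pair_count[key] += 1
--     for count in tick_pair_count.values():
--         if count > 1:
--             return True
--     return False
-- ===== SOURCE B (Python) =====
-- def is_single_year_range(mapping):
--     seen = set()
--     for m in mapping:
--         key = m['between_tick']
--         if key in seen:
--             return True
--         seen.add(key)
--     return False
-- ===== Notes on version B (the rewrite author's own statement) =====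
-- stated objective: simpler
-- what changed: Replaces A's two-pass structure (build a full count dict over all of mapping, then rescan its values for a count > 1) with a single pass keeping only a seen-set and returning True at the first repeated key.
import Mathlib
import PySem

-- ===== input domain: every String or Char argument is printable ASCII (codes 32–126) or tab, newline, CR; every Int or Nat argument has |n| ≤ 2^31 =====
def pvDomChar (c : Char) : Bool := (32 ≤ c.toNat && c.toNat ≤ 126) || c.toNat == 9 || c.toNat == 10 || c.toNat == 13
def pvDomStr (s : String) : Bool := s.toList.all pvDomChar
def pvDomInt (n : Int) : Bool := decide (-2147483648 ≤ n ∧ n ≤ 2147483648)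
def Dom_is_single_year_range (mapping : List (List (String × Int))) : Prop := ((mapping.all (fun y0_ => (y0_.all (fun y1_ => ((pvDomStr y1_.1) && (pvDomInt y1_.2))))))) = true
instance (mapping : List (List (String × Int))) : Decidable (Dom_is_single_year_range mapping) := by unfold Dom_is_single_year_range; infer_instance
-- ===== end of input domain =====

-- B is a single-pass duplicate detector with a seen-set instead of A's build-count-dict-then-rescan; return values proved equal wherever A returns (Pre_ excludes only KeyError inputs, where both raise).

-- ===== PORT A =====
-- m['between_tick']: first-match lookup in the association list; KeyError (none) is excluded by Pre_, .getD 0 is never reached inside Pre_.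
def pvKey (m : List (String × Int)) : Int := ((PySem.Dict.mk m).get? "between_tick").getD 0

def is_single_year_range (mapping : List (List (String × Int))) : Bool :=
  let tick_pair_count : PySem.Dict Int Int :=
    mapping.foldl (fun d m =>
      let key := pvKey m
      let d := PySem.Dict.setdefault d key 0
      PySem.Dict.modify d key 0 (· + 1)) PySem.Dict.empty
  (PySem.Dict.values tick_pair_count).any (fun count => count > 1)

-- ===== PORT B =====
def is_single_year_range_alt_loop (seen : PySem.Set Int) : List (List (String × Int)) → Bool
  | [] => false
  | m :: rest =>
    let key := pvKey m
    if PySem.Set.contains seen key then true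
    else is_single_year_range_alt_loop (PySem.Set.add seen key) rest

def is_single_year_range_alt (mapping : List (List (String × Int))) : Bool :=
  is_single_year_range_alt_loop PySem.Set.empty mapping

-- ===== PRECONDITION & SPEC =====
-- Pre_ excludes exactly the inputs where some inner dict lacks the key 'between_tick': there Python A raises KeyError (and B raises too).
def Pre_is_single_year_range (mapping : List (List (String × Int))) : Prop :=
  ∀ m ∈ mapping, (PySem.Dict.mk m).contains "between_tick" = true
instance (mapping : List (List (String × Int))) : Decidable (Pre_is_single_year_range mapping) := by unfold Pre_is_single_year_range; infer_instance
def pvWitness_is_single_year_range : (List (List (String × Int))) := [[("between_tick", 3)], [("between_tick", 3)]]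
def Spec_is_single_year_range (mapping : List (List (String × Int))) (out : Bool) : Prop := out = is_single_year_range_alt mapping
instance (mapping : List (List (String × Int))) (out : Bool) : Decidable (Spec_is_single_year_range mapping out) := by unfold Spec_is_single_year_range; infer_instance

-- ===== CLAIM (what is proved, stated in full; the proofs are below) =====
def Claim_equal_is_single_year_range : Prop := ∀ (mapping : List (List (String × Int))), Dom_is_single_year_range mapping → Pre_is_single_year_range mapping → Spec_is_single_year_range mapping (is_single_year_range mapping)

-- ===== LEMMAS AND PROOFS =====

-- setdefault followed by the += 1 modify is the counter-style modify
lemma setdefault_modify (d : PySem.Dict Int Int) (k : Int) :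
    PySem.Dict.modify (PySem.Dict.setdefault d k 0) k 0 (· + 1) = PySem.Dict.modify d k 0 (· + 1) := by
  by_cases h : d.contains k = true
  · rw [PySem.Dict.setdefault_of_contains d 0 h]
  · rw [PySem.Dict.setdefault_of_not_contains d 0 (by simpa using h)]
    simp [PySem.Dict.modify, PySem.Dict.getD_insert_self, PySem.Dict.insert_insert_self,
      PySem.Dict.getD_of_not_contains d 0 (by simpa using h)]

lemma a_fold_eq_counter (mapping : List (List (String × Int))) :
    mapping.foldl (fun d m =>
      PySem.Dict.modify (PySem.Dict.setdefault d (pvKey m) 0) (pvKey m) 0 (· + 1)) PySem.Dict.empty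
      = PySem.Dict.counter (mapping.map pvKey) := by
  rw [PySem.Dict.counter_eq_foldl, List.foldl_map]
  simp only [setdefault_modify]

lemma a_characterization (mapping : List (List (String × Int))) :
    is_single_year_range mapping = true ↔ ¬ (mapping.map pvKey).Nodup := by
  dsimp only [is_single_year_range]
  rw [a_fold_eq_counter]
  generalize (mapping.map pvKey) = keys
  simp only [PySem.Dict.values, PySem.Dict.items_counter, List.map_map, List.any_map,
    List.any_eq_true, Function.comp, List.nodup_iff_count_le_one, not_forall]
  constructor
  · rintro ⟨k, hk, hgt⟩
    exact ⟨k, by simp only [decide_eq_true_eq] at hgt; omega⟩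
  · rintro ⟨k, hk⟩
    refine ⟨k, ?_, ?_⟩
    · rw [PySem.Set.mem_ofList]
      exact List.count_pos_iff.mp (by omega)
    · simp only [decide_eq_true_eq]; omega

lemma b_loop_spec (l : List (List (String × Int))) :
    ∀ seen : PySem.Set Int,
      is_single_year_range_alt_loop seen l = true ↔
        (∃ k ∈ l.map pvKey, k ∈ seen) ∨ ¬ (l.map pvKey).Nodup := by
  induction l with
  | nil => intro seen; simp [is_single_year_range_alt_loop]
  | cons m rest ih =>
    intro seen
    show (if PySem.Set.contains seen (pvKey m) then true
      else is_single_year_range_alt_loop (PySem.Set.add seen (pvKey m)) rest) = true ↔ _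
    by_cases h : pvKey m ∈ seen
    · simp only [(PySem.Set.contains_iff seen (pvKey m)).mpr h, if_true]
      simp only [List.map_cons, List.mem_cons, true_iff]
      exact Or.inl ⟨pvKey m, Or.inl rfl, h⟩
    · rw [if_neg (by simpa using (fun hc => h ((PySem.Set.contains_iff seen (pvKey m)).mp hc)))]
      rw [ih (PySem.Set.add seen (pvKey m))]
      simp only [List.map_cons, List.nodup_cons, List.mem_cons, PySem.Set.mem_add, not_and_or, not_not]
      constructor
      · rintro (⟨k, hk, hks | hke⟩ | hnd)
        · exact Or.inl ⟨k, Or.inr hk, hks⟩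
        · exact Or.inr (Or.inl (hke ▸ hk))
        · exact Or.inr (Or.inr hnd)
      · rintro (⟨k, hk | hk, hks⟩ | hmem | hnd)
        · exact absurd (hk ▸ hks) h
        · exact Or.inl ⟨k, hk, Or.inl hks⟩
        · exact Or.inl ⟨pvKey m, hmem, Or.inr rfl⟩
        · exact Or.inr hnd

lemma b_characterization (mapping : List (List (String × Int))) :
    is_single_year_range_alt mapping = true ↔ ¬ (mapping.map pvKey).Nodup := by
  rw [show is_single_year_range_alt mapping = is_single_year_range_alt_loop PySem.Set.empty mapping from rfl,
    b_loop_spec]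
  simp [PySem.Set.empty]

-- ===== VERDICT (by name: the statement is the Claim_ definition above) =====
theorem is_single_year_range_spec : Claim_equal_is_single_year_range := by
  intro mapping _ _
  show is_single_year_range mapping = is_single_year_range_alt mapping
  have hA := a_characterization mapping
  have hB := b_characterization mapping
  cases hA' : is_single_year_range mapping <;> cases hB' : is_single_year_range_alt mapping <;>
    simp_all
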